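-- pv_equiv track=rewrite | github.com/mtsfy/advent-of-code | 2015/14-olympics.py | calculate_distances_per_second
-- ===== SOURCE A (Python) =====
-- def calculate_distances_per_second(speed, fly_time, rest_time, total_time):
--     distances = []
--     is_resting = False
--     total_distance = 0
--
--     while total_time > 0:
--         if is_resting:
--             for _ in range(rest_time):
--                 if total_time == 0:
--                     break
--                 distances.append(total_distance)
--                 total_time -= 1
--             is_resting = False
--         else:
--             for _ in range(fly_time):
--                 if total_time == 0:
--                     break
--                 total_distance += speed
--                 distances.append(total_distance)
--                 total_time -= 1
--             is_resting = True
--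
--     return distances
-- ===== SOURCE B (Python) =====
-- def calculate_distances_per_second(speed, fly_time, rest_time, total_time):
--     f = max(fly_time, 0)
--     r = max(rest_time, 0)
--     cycle = f + r
--     distances = []
--     for n in range(1, total_time + 1):
--         full, rem = divmod(n, cycle)
--         distances.append((full * f + min(rem, f)) * speed)
--     return distances
-- ===== Notes on version B (the rewrite author's own statement) =====
-- stated objective: simpler
-- what changed: Replaces A's alternating fly/rest nested-loop state machine with a single flat loop that computes each second's distance by the closed form full_cycles*fly_time + min(remainder, fly_time) via divmod; Pre_ excludes fly_time <= 0 and rest_time <= 0 with total_time > 0, where A loops forever (B raises ZeroDivisionError there).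
import Mathlib
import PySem

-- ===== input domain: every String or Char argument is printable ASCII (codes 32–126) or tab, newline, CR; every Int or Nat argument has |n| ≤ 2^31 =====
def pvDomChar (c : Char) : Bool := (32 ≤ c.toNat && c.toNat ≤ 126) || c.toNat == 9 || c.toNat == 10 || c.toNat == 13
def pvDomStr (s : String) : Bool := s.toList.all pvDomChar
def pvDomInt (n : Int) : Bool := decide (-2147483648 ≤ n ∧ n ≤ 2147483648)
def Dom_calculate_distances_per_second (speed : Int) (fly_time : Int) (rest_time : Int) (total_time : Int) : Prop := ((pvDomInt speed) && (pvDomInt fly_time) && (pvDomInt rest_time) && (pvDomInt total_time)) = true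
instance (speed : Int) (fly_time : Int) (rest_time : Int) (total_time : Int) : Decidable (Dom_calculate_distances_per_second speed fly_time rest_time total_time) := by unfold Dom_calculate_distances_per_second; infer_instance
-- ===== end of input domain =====

-- B replaces A's alternating fly/rest state machine with one flat loop computing each
-- second's distance by the divmod closed form (objective: simpler; same O(total_time) cost).

-- ===== PORT A =====
-- inner 'for _ in range(fly_time): if total_time == 0: break; total_distance += speed; …'
-- state: (distances, total_distance, total_time)
def pvFlyA (speed : Int) : Nat → Int → Int → List Int → (List Int × Int × Int)
  | 0, d, t, acc => (acc, d, t)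
  | k + 1, d, t, acc =>
    if t = 0 then (acc, d, t)
    else pvFlyA speed k (d + speed) (t - 1) (acc ++ [d + speed])

-- inner 'for _ in range(rest_time): if total_time == 0: break; distances.append(…); …'
def pvRestA : Nat → Int → Int → List Int → (List Int × Int × Int)
  | 0, d, t, acc => (acc, d, t)
  | k + 1, d, t, acc =>
    if t = 0 then (acc, d, t)
    else pvRestA k d (t - 1) (acc ++ [d])

-- the outer 'while total_time > 0' loop; fuel only makes the recursion total:
-- inside Pre_ 2*total_time+2 iterations always suffice (proved below); on the
-- excluded inputs the Python while loop never terminates.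
def pvLoopA (speed fly_time rest_time : Int) : Nat → Bool → Int → Int → List Int → List Int
  | 0, _, _, _, acc => acc
  | fuel + 1, is_resting, d, t, acc =>
    if 0 < t then
      if is_resting then
        let res := pvRestA rest_time.toNat d t acc
        pvLoopA speed fly_time rest_time fuel false res.2.1 res.2.2 res.1
      else
        let res := pvFlyA speed fly_time.toNat d t acc
        pvLoopA speed fly_time rest_time fuel true res.2.1 res.2.2 res.1
    else acc

def calculate_distances_per_second (speed : Int) (fly_time : Int) (rest_time : Int) (total_time : Int) : List Int :=
  pvLoopA speed fly_time rest_time (2 * total_time.toNat + 2) false 0 total_time []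

-- ===== PORT B =====
def calculate_distances_per_second_alt (speed : Int) (fly_time : Int) (rest_time : Int) (total_time : Int) : List Int :=
  let f := max fly_time 0
  let r := max rest_time 0
  let cycle := f + r
  (PySem.List.pyRange 1 (total_time + 1) 1).map (fun n =>
    match PySem.Int.divmod? n cycle with
    | some (full, rem) => (full * f + min rem f) * speed
    | none => 0)  -- cycle = 0: Python B raises ZeroDivisionError; unreachable inside Pre_

-- ===== PRECONDITION & SPEC =====
-- Pre_ excludes exactly the inputs (total_time > 0 with fly_time ≤ 0 and rest_time ≤ 0)
-- on which A's while loop never terminates (A returns nothing there; B raises ZeroDivisionError).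
def Pre_calculate_distances_per_second (speed : Int) (fly_time : Int) (rest_time : Int) (total_time : Int) : Prop :=
  total_time ≤ 0 ∨ 0 < fly_time ∨ 0 < rest_time
instance (speed : Int) (fly_time : Int) (rest_time : Int) (total_time : Int) : Decidable (Pre_calculate_distances_per_second speed fly_time rest_time total_time) := by unfold Pre_calculate_distances_per_second; infer_instance

def pvWitness_calculate_distances_per_second : Int × Int × Int × Int := (14, 10, 127, 100)

def Spec_calculate_distances_per_second (speed : Int) (fly_time : Int) (rest_time : Int) (total_time : Int) (out : List Int) : Prop := out = calculate_distances_per_second_alt speed fly_time rest_time total_time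
instance (speed : Int) (fly_time : Int) (rest_time : Int) (total_time : Int) (out : List Int) : Decidable (Spec_calculate_distances_per_second speed fly_time rest_time total_time out) := by unfold Spec_calculate_distances_per_second; infer_instance

-- ===== CLAIM (what is proved, stated in full; the proofs are below) =====
def Claim_equal_calculate_distances_per_second : Prop := ∀ (speed : Int) (fly_time : Int) (rest_time : Int) (total_time : Int), Dom_calculate_distances_per_second speed fly_time rest_time total_time → Pre_calculate_distances_per_second speed fly_time rest_time total_time → Spec_calculate_distances_per_second speed fly_time rest_time total_time (calculate_distances_per_second speed fly_time rest_time total_time)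

-- ===== LEMMAS AND PROOFS =====

-- B's per-second closed form, as a function of the second n (F = max fly_time 0, C = cycle)
def pvG (speed F C n : Int) : Int :=
  (PySem.Int.floordiv n C * F + min (PySem.Int.mod n C) F) * speed

lemma pvFlyA_spec (speed : Int) : ∀ (k t : Nat) (d : Int) (acc : List Int),
    pvFlyA speed k d (t : Int) acc
      = (acc ++ (List.range (min k t)).map (fun (i : Nat) => d + ((i : Int) + 1) * speed),
         d + (min k t : Nat) * speed, ((t - min k t : Nat) : Int)) := by
  intro k
  induction k with
  | zero => intro t d acc; simp [pvFlyA]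
  | succ k ih =>
    intro t d acc
    cases t with
    | zero => simp [pvFlyA]
    | succ s =>
      have h1 : ((s + 1 : Nat) : Int) ≠ 0 := by omega
      have h2 : ((s + 1 : Nat) : Int) - 1 = (s : Int) := by push_cast; ring
      rw [pvFlyA, if_neg h1, h2, ih s (d + speed) (acc ++ [d + speed])]
      have hmin : min (k + 1) (s + 1) = min k s + 1 := by omega
      have hlist : acc ++ [d + speed] ++ (List.range (min k s)).map
            (fun (i : Nat) => d + speed + ((i : Int) + 1) * speed)
          = acc ++ (List.range (min k s + 1)).map (fun (i : Nat) => d + ((i : Int) + 1) * speed) := by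
        rw [List.range_succ_eq_map, List.map_cons, List.map_map, List.append_assoc]
        congr 1
        rw [List.singleton_append]
        congr 1
        · push_cast; ring
        · apply List.map_congr_left
          intro i _
          simp only [Function.comp, Nat.succ_eq_add_one]
          push_cast; ring
      rw [hmin, ← hlist]
      refine congrArg₂ Prod.mk ?_ (congrArg₂ Prod.mk ?_ ?_)
      · simp [List.append_assoc]
      · push_cast; ring
      · congr 1; omega

lemma pvRestA_spec : ∀ (k t : Nat) (d : Int) (acc : List Int),
    pvRestA k d (t : Int) acc
      = (acc ++ List.replicate (min k t) d, d, ((t - min k t : Nat) : Int)) := by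
  intro k
  induction k with
  | zero => intro t d acc; simp [pvRestA]
  | succ k ih =>
    intro t d acc
    cases t with
    | zero => simp [pvRestA]
    | succ s =>
      have h1 : ((s + 1 : Nat) : Int) ≠ 0 := by omega
      have h2 : ((s + 1 : Nat) : Int) - 1 = (s : Int) := by push_cast; ring
      rw [pvRestA, if_neg h1, h2, ih s d (acc ++ [d])]
      have hmin : min (k + 1) (s + 1) = min k s + 1 := by omega
      rw [hmin]
      refine congrArg₂ Prod.mk ?_ (congrArg₂ Prod.mk ?_ ?_)
      · rw [List.replicate_succ, List.append_assoc, List.singleton_append]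
      · rfl
      · congr 1; omega

lemma pvG_small (speed F C : Int) (hF : 0 ≤ F) (hFC : F ≤ C) (hC : 0 < C)
    (n : Int) (h1 : 1 ≤ n) (h2 : n ≤ C) : pvG speed F C n = min n F * speed := by
  unfold pvG
  rcases lt_or_eq_of_le h2 with h | h
  · have hdiv : PySem.Int.floordiv n C = 0 := by
      rw [PySem.Int.floordiv_eq_iff_of_pos hC]; constructor <;> omega
    have hmod : PySem.Int.mod n C = n := by
      rw [PySem.Int.mod_eq_emod_of_pos hC]; exact Int.emod_eq_of_lt (by omega) h
    rw [hdiv, hmod]; ring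
  · subst h
    have hdiv : PySem.Int.floordiv n n = 1 := by
      rw [PySem.Int.floordiv_eq_iff_of_pos hC]; constructor <;> omega
    have hmod : PySem.Int.mod n n = 0 := by
      rw [PySem.Int.mod_eq_emod_of_pos hC]; simp
    rw [hdiv, hmod]
    have h3 : min n F = F := by omega
    have h4 : min (0 : Int) F = 0 := by omega
    rw [h3, h4]; ring

lemma pvG_shift (speed F C : Int) (hC : 0 < C) (n : Int) :
    pvG speed F C (n + C) = pvG speed F C n + F * speed := by
  unfold pvG
  have hdiv : PySem.Int.floordiv (n + C) C = PySem.Int.floordiv n C + 1 := by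
    rw [PySem.Int.floordiv_eq_ediv_of_pos hC, PySem.Int.floordiv_eq_ediv_of_pos hC]
    have h : n + C = n + 1 * C := by ring
    rw [h, Int.add_mul_ediv_right _ _ (by omega : C ≠ 0)]
  have hmod : PySem.Int.mod (n + C) C = PySem.Int.mod n C := by
    rw [PySem.Int.mod_eq_emod_of_pos hC, PySem.Int.mod_eq_emod_of_pos hC]
    simp [Int.add_emod]
  rw [hdiv, hmod]; ring

-- the main loop invariant: from a fresh (flying) state with distance d and τ seconds
-- left, A's loop appends exactly B's closed-form values shifted by d
lemma pvLoopA_eq (speed fly_time rest_time : Int)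
    (hc : 0 < fly_time.toNat + rest_time.toNat) :
    ∀ (τ : Nat) (fuel : Nat) (d : Int) (acc : List Int), 2 * τ + 2 ≤ fuel →
    pvLoopA speed fly_time rest_time fuel false d (τ : Int) acc
      = acc ++ (List.range τ).map (fun (k : Nat) =>
          d + pvG speed (fly_time.toNat : Int) ((fly_time.toNat + rest_time.toNat : Nat) : Int) ((k : Int) + 1)) := by
  intro τ
  induction τ using Nat.strong_induction_on with
  | _ τ ih =>
    intro fuel d acc hfuel
    set F : Nat := fly_time.toNat with hFdef
    set R : Nat := rest_time.toNat with hRdef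
    obtain ⟨f1, rfl⟩ : ∃ f1, fuel = f1 + 1 := ⟨fuel - 1, by omega⟩
    rcases Nat.eq_zero_or_pos τ with hτ | hτ
    · subst hτ; simp [pvLoopA]
    · have hτpos : (0 : Int) < (τ : Int) := by exact_mod_cast hτ
      rw [pvLoopA, if_pos hτpos, if_neg Bool.false_ne_true]
      rw [pvFlyA_spec speed F τ d acc]
      dsimp only
      obtain ⟨f2, rfl⟩ : ∃ f2, f1 = f2 + 1 := ⟨f1 - 1, by omega⟩
      have hC : (0 : Int) < ((F + R : Nat) : Int) := by exact_mod_cast hc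
      have hFC : ((F : Nat) : Int) ≤ ((F + R : Nat) : Int) := by push_cast; omega
      rcases Nat.eq_zero_or_pos (τ - min F τ) with ht10 | ht1pos
      · -- the fly phase consumed all remaining seconds: τ ≤ F
        rw [ht10, pvLoopA, if_neg (by simp : ¬ (0 : Int) < ((0 : Nat) : Int))]
        have hm1τ : min F τ = τ := by omega
        rw [hm1τ]
        congr 1
        apply List.map_congr_left
        intro k hk
        rw [List.mem_range] at hk
        rw [pvG_small speed _ _ (by positivity) hFC hC ((k : Int) + 1)
            (by omega) (by push_cast; omega)]
        have hmin : min ((k : Int) + 1) ((F : Nat) : Int) = (k : Int) + 1 := by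
          push_cast; omega
        rw [hmin]
      · -- τ > F: the rest phase follows, then a recursive fresh state
        have ht1posI : (0 : Int) < ((τ - min F τ : Nat) : Int) := by exact_mod_cast ht1pos
        rw [pvLoopA, if_pos ht1posI, if_pos rfl]
        rw [pvRestA_spec R (τ - min F τ) (d + ((min F τ : Nat) : Int) * speed)]
        dsimp only
        have hm1F : min F τ = F := by omega
        have hdec : τ - min F τ - min R (τ - min F τ) < τ := by omega
        have hfuel2 : 2 * (τ - min F τ - min R (τ - min F τ)) + 2 ≤ f2 := by omega
        rw [ih _ hdec f2 _ _ hfuel2]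
        rw [hm1F]
        have hsplit : τ = (F + min R (τ - F)) + (τ - F - min R (τ - F)) := by omega
        conv_rhs => rw [hsplit, List.range_add, List.range_add]
        simp only [List.map_append, List.map_map, List.append_assoc]
        congr 1
        congr 1
        · -- fly segment
          apply List.map_congr_left
          intro k hk
          rw [List.mem_range] at hk
          rw [pvG_small speed _ _ (by positivity) hFC hC ((k : Int) + 1)
              (by omega) (by push_cast; omega)]
          have hmin : min ((k : Int) + 1) ((F : Nat) : Int) = (k : Int) + 1 := by
            push_cast; omega
          rw [hmin]
        congr 1
        · -- rest segment: a constant block of the current distance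
          have hconst : ∀ k ∈ List.range (min R (τ - F)),
              (fun (k : Nat) => d + pvG speed ((F : Nat) : Int) ((F + R : Nat) : Int) ((k : Int) + 1))
                  (F + k)
                = d + ((F : Nat) : Int) * speed := by
            intro k hk
            rw [List.mem_range] at hk
            simp only
            have harg : (((F + k : Nat) : Int) + 1) = ((F : Int) + (k : Int) + 1) := by push_cast; ring
            rw [harg, pvG_small speed _ _ (by positivity) hFC hC _ (by push_cast; omega)
                (by push_cast; omega)]
            have hmin : min ((F : Int) + (k : Int) + 1) ((F : Nat) : Int) = ((F : Nat) : Int) := by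
              push_cast; omega
            rw [hmin]
          symm
          calc List.map ((fun (k : Nat) => d + pvG speed ((F : Nat) : Int) ((F + R : Nat) : Int) ((k : Int) + 1)) ∘ fun x => F + x) (List.range (min R (τ - F)))
              = List.map (fun (_ : Nat) => d + ((F : Nat) : Int) * speed) (List.range (min R (τ - F))) := by
                apply List.map_congr_left
                intro k hk
                simp only [Function.comp]
                exact hconst k hk
            _ = List.replicate (min R (τ - F)) (d + ((F : Nat) : Int) * speed) := by
                rw [List.map_const', List.length_range]
        · -- recursive tail: one full cycle ahead
          apply List.map_congr_left
          intro k hk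
          rw [List.mem_range] at hk
          simp only [Function.comp]
          have hm2R : min R (τ - F) = R := by omega
          have harg : ((F + min R (τ - F) + k : Nat) : Int) + 1
              = ((k : Int) + 1) + ((F + R : Nat) : Int) := by
            rw [hm2R]; push_cast; ring
          rw [harg, pvG_shift speed _ _ hC]
          push_cast
          ring

-- B unfolded to the same closed form over List.range
lemma alt_eq_map (speed fly_time rest_time total_time : Int)
    (hc : 0 < fly_time.toNat + rest_time.toNat) :
    calculate_distances_per_second_alt speed fly_time rest_time total_time
      = (List.range total_time.toNat).map (fun (k : Nat) =>
          pvG speed (fly_time.toNat : Int) ((fly_time.toNat + rest_time.toNat : Nat) : Int) ((k : Int) + 1)) := by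
  unfold calculate_distances_per_second_alt
  have hmaxf : max fly_time 0 = (fly_time.toNat : Int) := by omega
  have hC : max fly_time 0 + max rest_time 0 = ((fly_time.toNat + rest_time.toNat : Nat) : Int) := by
    push_cast; omega
  have hCne : max fly_time 0 + max rest_time 0 ≠ 0 := by omega
  rw [PySem.List.pyRange_one]
  have hlen : (total_time + 1 - 1).toNat = total_time.toNat := by omega
  rw [hlen, List.map_map]
  apply List.map_congr_left
  intro k hk
  simp only [Function.comp]
  have hdm : PySem.Int.divmod? (1 + (k : Int)) (max fly_time 0 + max rest_time 0)
      = some (PySem.Int.floordiv (1 + (k : Int)) (max fly_time 0 + max rest_time 0),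
              PySem.Int.mod (1 + (k : Int)) (max fly_time 0 + max rest_time 0)) := by
    simp [PySem.Int.divmod?, hCne, PySem.Int.floordiv, PySem.Int.mod]
  rw [hdm]
  have hmaxr : max rest_time 0 = (rest_time.toNat : Int) := by omega
  have h : (1 : Int) + (k : Int) = (k : Int) + 1 := by ring
  simp only [pvG, hmaxf, hmaxr, h]
  push_cast
  ring_nf

-- ===== VERDICT (by name: the statement is the Claim_ definition above) =====
theorem calculate_distances_per_second_spec : Claim_equal_calculate_distances_per_second := by
  intro speed fly_time rest_time total_time _hdom hpre
  unfold Spec_calculate_distances_per_second calculate_distances_per_second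
  rcases le_or_gt total_time 0 with ht | ht
  · -- total_time ≤ 0: both sides are []
    have h0 : total_time.toNat = 0 := by omega
    rw [h0]
    have hneg : ¬ (0 : Int) < total_time := by omega
    simp only [pvLoopA, if_neg hneg]
    unfold calculate_distances_per_second_alt
    rw [PySem.List.pyRange_one]
    have h1 : (total_time + 1 - 1).toNat = 0 := by omega
    rw [h1]
    simp
  · have hc : 0 < fly_time.toNat + rest_time.toNat := by
      unfold Pre_calculate_distances_per_second at hpre; omega
    have htc : ((total_time.toNat : Nat) : Int) = total_time := by omega
    have hmain := pvLoopA_eq speed fly_time rest_time hc total_time.toNat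
      (2 * total_time.toNat + 2) 0 [] (le_refl _)
    rw [htc] at hmain
    rw [hmain, alt_eq_map speed fly_time rest_time total_time hc]
    simp
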